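-- pv_equiv track=rewrite | github.com/rackjoobee/smartversion | smartversion/tuple_smartversion.py | most_versiony_chars_idx
-- ===== SOURCE A (Python) =====
-- import string
--
-- VERSIONY_CHARS = list(string.digits) + ['.']
--
-- def most_versiony_chars_idx(search_list):
--     """Find the index of the list element with the most versiony chars,
--        -1 if no elements had VC or list len == 0"""
--     if len(search_list) == 0:
--         return -1
--     max_val = 0
--     max_vc_idx = -1
--     for i in range(len(search_list)):
--         # Can't use a set because it won't count repeated digits
--         val = 0
--         for c in search_list[i]:
--             if c in VERSIONY_CHARS:
--                 # Actually we're lying. Give periods twice the weight of digits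
--                 val += 2 if c == '.' else 1
--         if val > max_val:
--             max_val = val
--             max_vc_idx = i
--     return max_vc_idx
-- ===== SOURCE B (Python) =====
-- import string
--
-- VERSIONY_CHARS = list(string.digits) + ['.']
--
-- def _vc_weight_sum(s):
--     return sum(2 if c == '.' else 1 for c in s if c in VERSIONY_CHARS)
--
-- def most_versiony_chars_idx(search_list):
--     """Find the index of the list element with the most versiony chars,
--        -1 if no elements had VC or list len == 0.
--        Sort-based: rank (index, element) pairs by weighted score descending;
--        Timsort stability keeps the first-seen index ahead on score ties, so
--        the head of the ranking is exactly the first maximum."""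
--     ranked = sorted(enumerate(search_list), key=lambda t: _vc_weight_sum(t[1]), reverse=True)
--     if ranked and _vc_weight_sum(ranked[0][1]) > 0:
--         return ranked[0][0]
--     return -1
-- ===== Notes on version B (the rewrite author's own statement) =====
-- stated objective: alternative
-- what changed: Replaces A's single-pass running argmax by sort-then-pick-head: rank the (index, element) pairs by weighted score with a stable descending sort, then return the head's index if its score is positive, else -1; stability supplies A's first-max tie-break.
import Mathlib
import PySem

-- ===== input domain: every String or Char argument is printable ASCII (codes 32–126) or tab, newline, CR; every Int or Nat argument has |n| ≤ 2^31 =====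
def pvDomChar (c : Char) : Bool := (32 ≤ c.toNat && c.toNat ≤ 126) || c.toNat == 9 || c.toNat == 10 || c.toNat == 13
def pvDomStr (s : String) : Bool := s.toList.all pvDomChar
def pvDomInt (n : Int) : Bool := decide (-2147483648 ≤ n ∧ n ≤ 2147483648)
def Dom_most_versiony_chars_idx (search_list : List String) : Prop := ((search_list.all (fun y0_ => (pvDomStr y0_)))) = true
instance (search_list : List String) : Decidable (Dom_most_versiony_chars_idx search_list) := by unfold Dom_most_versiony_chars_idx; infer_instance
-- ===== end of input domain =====

-- B replaces A's running-argmax loop by sort-then-pick-head: rank (index, element)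
-- pairs by weighted score with a stable descending sort and return the head's index
-- if its score is positive, else -1 (alternative algorithm, same result).

-- ===== PORT A =====
-- VERSIONY_CHARS = list(string.digits) + ['.']
def VERSIONY_CHARS : List Char :=
  ['0', '1', '2', '3', '4', '5', '6', '7', '8', '9', '.']

def most_versiony_chars_idx (search_list : List String) : Int :=
  if search_list.length = 0 then -1
  else
    -- 'for i in range(len(search_list)): … search_list[i] …' as a fold over enumerate
    let r := (PySem.List.enumerate search_list 0).foldl
      (fun (st : Int × Int) p =>
        let val := p.2.toList.foldl
          (fun v c => if c ∈ VERSIONY_CHARS then v + (if c = '.' then 2 else 1) else v) 0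
        if val > st.1 then (val, p.1) else st)
      (0, -1)
    r.2

-- ===== PORT B =====
-- _vc_weight_sum(s) = sum(2 if c == '.' else 1 for c in s if c in VERSIONY_CHARS)
def pvScore (s : String) : Int :=
  ((s.toList.filter (fun c => c ∈ VERSIONY_CHARS)).map
    (fun c => if c = '.' then (2 : Int) else 1)).sum

-- ranked = sorted(enumerate(search_list), key=lambda t: _vc_weight_sum(t[1]), reverse=True)
def most_versiony_chars_idx_alt (search_list : List String) : Int :=
  let ranked := PySem.List.sorted (PySem.List.enumerate search_list 0)
                  (fun t => pvScore t.2) true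
  match ranked with
  | [] => -1
  | h :: _ => if pvScore h.2 > 0 then h.1 else -1

-- ===== PRECONDITION & SPEC =====
def Spec_most_versiony_chars_idx (search_list : List String) (out : Int) : Prop := out = most_versiony_chars_idx_alt search_list
instance (search_list : List String) (out : Int) : Decidable (Spec_most_versiony_chars_idx search_list out) := by unfold Spec_most_versiony_chars_idx; infer_instance

-- ===== CLAIM (what is proved, stated in full; the proofs are below) =====
def Claim_equal_most_versiony_chars_idx : Prop := ∀ (search_list : List String), Dom_most_versiony_chars_idx search_list → Spec_most_versiony_chars_idx search_list (most_versiony_chars_idx search_list)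

-- ===== LEMMAS AND PROOFS =====

-- A's inner character loop computes B's filter/map/sum score.
lemma pv_score_chars (cs : List Char) (v : Int) :
    cs.foldl (fun v c => if c ∈ VERSIONY_CHARS then v + (if c = '.' then 2 else 1) else v) v
      = v + ((cs.filter (fun c => c ∈ VERSIONY_CHARS)).map
              (fun c => if c = '.' then (2 : Int) else 1)).sum := by
  induction cs generalizing v with
  | nil => simp
  | cons c cs ih =>
    by_cases hc : c ∈ VERSIONY_CHARS
    · simp [hc, ih]; ring
    · simp [hc, ih]

lemma pv_score_fold (s : String) :
    s.toList.foldl (fun v c => if c ∈ VERSIONY_CHARS then v + (if c = '.' then 2 else 1) else v) 0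
      = pvScore s := by
  simp [pvScore, pv_score_chars]

lemma pv_score_nonneg (s : String) : 0 ≤ pvScore s := by
  unfold pvScore
  apply List.sum_nonneg
  intro x hx
  simp only [List.mem_map, List.mem_filter] at hx
  obtain ⟨c, -, rfl⟩ := hx
  split <;> norm_num

-- Folding reverse insertion sort onto a nonempty accumulator: the head of the
-- result is the stable argmax (strictly greater score replaces) of the inserted
-- elements against the old head.
lemma pv_head_ins (xs : List (Int × String)) (h : Int × String) (t : List (Int × String)) :
    ∃ t', xs.foldl
        (fun acc x => PySem.List.insertBy
          (fun a b => decide (pvScore b.2 < pvScore a.2)) x acc) (h :: t)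
      = (xs.foldl (fun b p => if pvScore b.2 < pvScore p.2 then p else b) h) :: t' := by
  induction xs generalizing h t with
  | nil => exact ⟨t, rfl⟩
  | cons x xs ih =>
    simp only [List.foldl_cons]
    by_cases hc : pvScore h.2 < pvScore x.2
    · have hins : PySem.List.insertBy (fun a b => decide (pvScore b.2 < pvScore a.2)) x (h :: t)
          = x :: h :: t := by
        simp [PySem.List.insertBy, hc]
      rw [hins, if_pos hc]
      exact ih x (h :: t)
    · have hins : PySem.List.insertBy (fun a b => decide (pvScore b.2 < pvScore a.2)) x (h :: t)
          = h :: PySem.List.insertBy (fun a b => decide (pvScore b.2 < pvScore a.2)) x t := by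
        simp [PySem.List.insertBy, hc]
      rw [hins, if_neg hc]
      exact ih h _

-- A's running-argmax state (max_val, max_vc_idx) tracks B's stable argmax candidate.
lemma pv_bridge (xs : List (Int × String)) (b : Int × String) (m j : Int)
    (hR : (0 < pvScore b.2 ∧ m = pvScore b.2 ∧ j = b.1) ∨ (pvScore b.2 = 0 ∧ m = 0 ∧ j = -1)) :
    (xs.foldl (fun (st : Int × Int) p =>
        if pvScore p.2 > st.1 then (pvScore p.2, p.1) else st) (m, j)).2
      = (if pvScore (xs.foldl (fun b p => if pvScore b.2 < pvScore p.2 then p else b) b).2 > 0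
         then (xs.foldl (fun b p => if pvScore b.2 < pvScore p.2 then p else b) b).1 else -1) := by
  induction xs generalizing b m j with
  | nil =>
    rcases hR with ⟨h1, rfl, rfl⟩ | ⟨h1, rfl, rfl⟩
    · simp [h1]
    · simp [h1]
  | cons p xs ih =>
    simp only [List.foldl_cons]
    rcases hR with ⟨h1, rfl, rfl⟩ | ⟨h1, rfl, rfl⟩
    · by_cases hc : pvScore b.2 < pvScore p.2
      · rw [if_pos hc, if_pos hc]
        exact ih p _ _ (Or.inl ⟨lt_trans h1 hc, rfl, rfl⟩)
      · rw [if_neg hc, if_neg hc]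
        exact ih b _ _ (Or.inl ⟨h1, rfl, rfl⟩)
    · by_cases hc : 0 < pvScore p.2
      · have hc' : pvScore b.2 < pvScore p.2 := by omega
        rw [if_pos hc, if_pos hc']
        exact ih p _ _ (Or.inl ⟨hc, rfl, rfl⟩)
      · have hp0 : pvScore p.2 = 0 := le_antisymm (by omega) (pv_score_nonneg p.2)
        have hc' : ¬ pvScore b.2 < pvScore p.2 := by omega
        rw [if_neg hc, if_neg hc']
        exact ih b _ _ (Or.inr ⟨h1, rfl, rfl⟩)

-- ===== VERDICT (by name: the statement is the Claim_ definition above) =====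
theorem most_versiony_chars_idx_spec : Claim_equal_most_versiony_chars_idx := by
  intro l _
  unfold Spec_most_versiony_chars_idx
  cases l with
  | nil => simp [most_versiony_chars_idx, most_versiony_chars_idx_alt,
                 PySem.List.enumerate_nil, PySem.List.sorted]
  | cons s t =>
    unfold most_versiony_chars_idx most_versiony_chars_idx_alt
    simp only [List.length_cons, Nat.succ_ne_zero, if_false]
    -- B side: head of the reverse sort of enumerate
    rw [PySem.List.sorted_rev_eq_foldl_insertBy, PySem.List.enumerate_cons]
    simp only [List.foldl_cons]
    have hins0 : PySem.List.insertBy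
        (fun a b => decide (pvScore b.2 < pvScore a.2)) ((0 : Int), s) ([] : List (Int × String))
        = [((0 : Int), s)] := by
      simp [PySem.List.insertBy]
    rw [hins0]
    obtain ⟨t', ht'⟩ := pv_head_ins (PySem.List.enumerate t 1) ((0 : Int), s) []
    -- A side: rewrite the inner character loop to pvScore, normalise 0+1
    simp only [show (0 : Int) + 1 = 1 from rfl, pv_score_fold]
    rw [ht']
    by_cases hs : 0 < pvScore s
    · rw [if_pos (by simpa using hs)]
      exact pv_bridge _ ((0 : Int), s) _ _ (Or.inl ⟨hs, rfl, rfl⟩)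
    · have hs0 : pvScore s = 0 := le_antisymm (by omega) (pv_score_nonneg s)
      rw [if_neg (by simpa using hs)]
      exact pv_bridge _ ((0 : Int), s) _ _ (Or.inr ⟨hs0, rfl, rfl⟩)
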